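-- pv_equiv track=rewrite | github.com/danielmao2019/Pylon | utils/graphs/k_core.py | compute_k_core_nodes
-- ===== SOURCE A (Python) =====
-- from collections import deque
-- from typing import Dict, List
--
-- def compute_k_core_nodes(
--     node_ids: List[int], adjacency: Dict[int, Dict[int, int]], k_core: int
-- ) -> List[int]:
--     # Input validations
--     assert isinstance(node_ids, list), f"{type(node_ids)=}"
--     assert node_ids, "node_ids must be non-empty"
--     assert all(isinstance(node_id, int) for node_id in node_ids), f"{node_ids=}"
--     assert isinstance(adjacency, dict), f"{type(adjacency)=}"
--     assert isinstance(k_core, int), f"{type(k_core)=}"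
--     assert k_core > 0, f"{k_core=}"
--     assert all(node_id in adjacency for node_id in node_ids), (
--         "adjacency missing node_id entries from node_ids"
--     )
--
--     remaining_node_ids = set(node_ids)
--     degrees: Dict[int, int] = {}
--     for node_id in node_ids:
--         node_degree = 0
--         neighbors = adjacency[node_id]
--         for neighbor_id in neighbors:
--             if neighbor_id in remaining_node_ids:
--                 node_degree += 1
--         degrees[node_id] = node_degree
--
--     removal_queue = deque(
--         [node_id for node_id in node_ids if degrees[node_id] < k_core]
--     )
--     while removal_queue:
--         node_id = removal_queue.popleft()
--         if node_id not in remaining_node_ids: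
--             continue
--         remaining_node_ids.remove(node_id)
--         for neighbor_id in adjacency[node_id]:
--             if neighbor_id not in remaining_node_ids:
--                 continue
--             degrees[neighbor_id] -= 1
--             if degrees[neighbor_id] < k_core:
--                 removal_queue.append(neighbor_id)
--
--     return sorted(remaining_node_ids)
-- ===== SOURCE B (Python) =====
-- from typing import Dict, List
--
--
-- def compute_k_core_nodes(
--     node_ids: List[int], adjacency: Dict[int, Dict[int, int]], k_core: int
-- ) -> List[int]:
--     # Input validations
--     assert isinstance(node_ids, list), f"{type(node_ids)=}"
--     assert node_ids, "node_ids must be non-empty"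
--     assert all(isinstance(node_id, int) for node_id in node_ids), f"{node_ids=}"
--     assert isinstance(adjacency, dict), f"{type(adjacency)=}"
--     assert isinstance(k_core, int), f"{type(k_core)=}"
--     assert k_core > 0, f"{k_core=}"
--     assert all(node_id in adjacency for node_id in node_ids), (
--         "adjacency missing node_id entries from node_ids"
--     )
--
--     remaining = set(node_ids)
--     degrees = {n: sum(1 for v in adjacency[n] if v in remaining) for n in node_ids}
--
--     # Batch fixpoint: repeatedly strip ALL currently deficient nodes in one pass,
--     # then account for the edges lost to this batch, until no node is deficient.
--     while True:
--         doomed = {n for n in remaining if degrees[n] < k_core}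
--         if not doomed:
--             break
--         remaining -= doomed
--         for u in doomed:
--             for v in adjacency[u]:
--                 if v in remaining:
--                     degrees[v] -= 1
--
--     return sorted(remaining)
-- ===== Notes on version B (the rewrite author's own statement) =====
-- stated objective: alternative
-- what changed: Replaces the deque-driven one-node-at-a-time cascade (pop, remove, decrement neighbours, enqueue) with a batch fixpoint loop: each pass collects ALL currently deficient remaining nodes, removes them at once, then charges the lost edges to the survivors, repeating until no node is deficient.
import Mathlib
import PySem

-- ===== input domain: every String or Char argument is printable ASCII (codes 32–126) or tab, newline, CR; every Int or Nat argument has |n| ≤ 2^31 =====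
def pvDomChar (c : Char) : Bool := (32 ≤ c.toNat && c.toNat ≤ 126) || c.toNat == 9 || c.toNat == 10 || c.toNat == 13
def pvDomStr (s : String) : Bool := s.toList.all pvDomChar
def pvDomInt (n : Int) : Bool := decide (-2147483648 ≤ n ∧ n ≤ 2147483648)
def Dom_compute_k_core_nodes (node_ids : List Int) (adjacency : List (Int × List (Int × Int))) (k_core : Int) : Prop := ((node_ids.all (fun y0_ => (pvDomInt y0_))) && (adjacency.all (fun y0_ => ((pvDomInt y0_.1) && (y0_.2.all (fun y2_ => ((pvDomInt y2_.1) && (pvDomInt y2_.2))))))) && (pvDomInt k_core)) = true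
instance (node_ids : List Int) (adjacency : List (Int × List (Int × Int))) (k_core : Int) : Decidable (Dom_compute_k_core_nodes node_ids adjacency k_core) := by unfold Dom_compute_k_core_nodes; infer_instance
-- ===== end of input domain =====

-- B replaces A's deque-driven one-node-at-a-time cascade by a batch fixpoint loop
-- (strip ALL currently deficient nodes per pass); same return value, similar cost (objective: alternative).

-- termination helper for both loops: a sublist missing a member is strictly shorter
theorem pv_length_lt_of_sublist {α : Type} {s l : List α} (hsub : s.Sublist l) {x : α}
    (hx : x ∈ l) (hxs : x ∉ s) : s.length < l.length := by
  rcases Nat.lt_or_ge s.length l.length with h | h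
  · exact h
  · exact absurd (hsub.eq_of_length_le h ▸ hx) hxs

-- ===== PORT A =====
-- adjacency[n] is a Python dict; iterating it yields its (distinct) keys.
def pvAdjKeys (adjacency : List (Int × List (Int × Int))) (n : Int) : List Int :=
  PySem.Set.ofList ((((PySem.Dict.mk adjacency).get? n).getD []).map Prod.fst)

-- the 'while removal_queue:' loop of A: pop left, remove, decrement live neighbours, enqueue newly deficient
def pvALoop (adjacency : List (Int × List (Int × Int))) (k : Int) :
    List Int → PySem.Set Int → PySem.Dict Int Int → PySem.Set Int
  | [], S, _ => S
  | n :: q, S, d =>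
    if hn : n ∈ S then
      let S' := PySem.Set.discard S n
      let st := (pvAdjKeys adjacency n).foldl
        (fun st v =>
          if PySem.Set.contains S' v then
            let d2 := st.1.modify v 0 (· - 1)
            if d2.getD v 0 < k then (d2, st.2 ++ [v]) else (d2, st.2)
          else st) (d, q)
      pvALoop adjacency k st.2 S' st.1
    else pvALoop adjacency k q S d
  termination_by q S _ => (S.length, q.length)
  decreasing_by
  · exact Prod.Lex.left _ _ (pv_length_lt_of_sublist
      (by simp [PySem.Set.discard])
      hn (by simp [PySem.Set.mem_discard]))
  · exact Prod.Lex.right _ (Nat.lt_succ_self _)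

def compute_k_core_nodes (node_ids : List Int) (adjacency : List (Int × List (Int × Int))) (k_core : Int) : List Int :=
  let remaining : PySem.Set Int := PySem.Set.ofList node_ids
  let degrees : PySem.Dict Int Int := node_ids.foldl
    (fun d n => d.insert n ((pvAdjKeys adjacency n).foldl
      (fun acc v => if PySem.Set.contains remaining v then acc + 1 else acc) (0 : Int)))
    PySem.Dict.empty
  let queue := node_ids.filter (fun n => decide (degrees.getD n 0 < k_core))
  PySem.List.sorted (pvALoop adjacency k_core queue remaining degrees) (fun x => x) false

-- ===== PORT B =====
-- the 'while True:' batch loop of B: collect all deficient nodes, drop them, charge lost edges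
def pvDoomed (k : Int) (S : PySem.Set Int) (d : PySem.Dict Int Int) : List Int :=
  S.filter (fun n => decide (d.getD n 0 < k))

def pvBLoop (adjacency : List (Int × List (Int × Int))) (k : Int)
    (S : PySem.Set Int) (d : PySem.Dict Int Int) : PySem.Set Int :=
  let doomed := pvDoomed k S d
  if doomed.isEmpty then S
  else
    let S' := PySem.Set.diff S doomed
    let d' := doomed.foldl
      (fun d u => (pvAdjKeys adjacency u).foldl
        (fun d v => if PySem.Set.contains S' v then d.modify v 0 (· - 1) else d) d) d
    pvBLoop adjacency k S' d'
  termination_by S.length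
  decreasing_by
  · rename_i h
    rcases List.exists_mem_of_ne_nil _ (by simpa [List.isEmpty_iff] using h) with ⟨x, hx⟩
    exact pv_length_lt_of_sublist
      (by simp [PySem.Set.diff])
      (List.mem_filter.mp hx).1
      (fun hmem => ((PySem.Set.mem_diff _ _ _).mp hmem).2 hx)

def compute_k_core_nodes_alt (node_ids : List Int) (adjacency : List (Int × List (Int × Int))) (k_core : Int) : List Int :=
  let remaining : PySem.Set Int := PySem.Set.ofList node_ids
  let degrees : PySem.Dict Int Int := node_ids.foldl
    (fun d n => d.insert n (((pvAdjKeys adjacency n).countP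
      (fun v => PySem.Set.contains remaining v) : Nat) : Int))
    PySem.Dict.empty
  PySem.List.sorted (pvBLoop adjacency k_core remaining degrees) (fun x => x) false

-- ===== PRECONDITION & SPEC =====
-- Pre_ = exactly the inputs A's assertions accept: non-empty node_ids, k_core > 0, every node id a key of adjacency.
def Pre_compute_k_core_nodes (node_ids : List Int) (adjacency : List (Int × List (Int × Int))) (k_core : Int) : Prop :=
  node_ids ≠ [] ∧ 0 < k_core ∧ ∀ n ∈ node_ids, ((PySem.Dict.mk adjacency).get? n).isSome
instance (node_ids : List Int) (adjacency : List (Int × List (Int × Int))) (k_core : Int) : Decidable (Pre_compute_k_core_nodes node_ids adjacency k_core) := by unfold Pre_compute_k_core_nodes; infer_instance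

def pvWitness_compute_k_core_nodes : List Int × (List (Int × List (Int × Int))) × Int :=
  ([1, 2, 3], [(1, [(2, 1), (3, 1)]), (2, [(1, 1), (3, 1)]), (3, [(1, 1), (2, 1)])], 2)

def Spec_compute_k_core_nodes (node_ids : List Int) (adjacency : List (Int × List (Int × Int))) (k_core : Int) (out : List Int) : Prop := out = compute_k_core_nodes_alt node_ids adjacency k_core
instance (node_ids : List Int) (adjacency : List (Int × List (Int × Int))) (k_core : Int) (out : List Int) : Decidable (Spec_compute_k_core_nodes node_ids adjacency k_core out) := by unfold Spec_compute_k_core_nodes; infer_instance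

-- ===== CLAIM (what is proved, stated in full; the proofs are below) =====
def Claim_equal_compute_k_core_nodes : Prop := ∀ (node_ids : List Int) (adjacency : List (Int × List (Int × Int))) (k_core : Int), Dom_compute_k_core_nodes node_ids adjacency k_core → Pre_compute_k_core_nodes node_ids adjacency k_core → Spec_compute_k_core_nodes node_ids adjacency k_core (compute_k_core_nodes node_ids adjacency k_core)

-- ===== LEMMAS AND PROOFS =====

-- the distinct node ids, in first-occurrence order
def pvN (node_ids : List Int) : List Int := PySem.Set.ofList node_ids

-- initial degree of n: its distinct neighbours that are node ids
def pvDeg0 (node_ids : List Int) (adjacency : List (Int × List (Int × Int))) (n : Int) : Int :=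
  ((pvAdjKeys adjacency n).countP (fun v => PySem.Set.contains (pvN node_ids) v) : Int)

-- in-edges into m coming from already-removed nodes (node ids outside S)
def pvRem (node_ids : List Int) (adjacency : List (Int × List (Int × Int))) (S : List Int) (m : Int) : Int :=
  ((pvN node_ids).countP (fun u => !PySem.Set.contains S u && PySem.Set.contains (pvAdjKeys adjacency u) m) : Int)

-- the "current degree" both loops maintain for every still-remaining node
def pvEff (node_ids : List Int) (adjacency : List (Int × List (Int × Int))) (S : List Int) (m : Int) : Int :=
  pvDeg0 node_ids adjacency m - pvRem node_ids adjacency S m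

def pvGood (node_ids : List Int) (adjacency : List (Int × List (Int × Int))) (k : Int) (S : List Int) : Prop :=
  (∀ x ∈ S, x ∈ pvN node_ids) ∧ ∀ m ∈ S, k ≤ pvEff node_ids adjacency S m

lemma pvAdjKeys_nodup (adjacency : List (Int × List (Int × Int))) (n : Int) :
    (pvAdjKeys adjacency n).Nodup := by unfold pvAdjKeys; exact PySem.Set.nodup_ofList _

lemma pv_contains_eq_decide (S : List Int) (u : Int) :
    PySem.Set.contains S u = decide (u ∈ S) := by
  by_cases h : u ∈ S
  · simpa [h] using (PySem.Set.contains_iff S u).mpr h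
  · simp only [h, decide_false]
    rw [Bool.eq_false_iff]
    intro hc
    exact h ((PySem.Set.contains_iff S u).mp hc)

lemma pvRem_congr (node_ids : List Int) (adjacency : List (Int × List (Int × Int)))
    {S T : List Int} (h : ∀ u : Int, u ∈ S ↔ u ∈ T) (m : Int) :
    pvRem node_ids adjacency S m = pvRem node_ids adjacency T m := by
  unfold pvRem
  congr 1
  apply List.countP_congr
  intro u _
  simp only [pv_contains_eq_decide, Bool.and_eq_true, Bool.not_eq_true', decide_eq_false_iff_not,
    decide_eq_true_eq]
  rw [h u]

lemma pv_countP_remove {l : List Int} (hl : l.Nodup) {n : Int} (hn : n ∈ l)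
    (p q : Int → Bool) (hagree : ∀ u ∈ l, u ≠ n → p u = q u) (hpn : p n = false) :
    (l.countP q : Int) = (l.countP p : Int) + (if q n then 1 else 0) := by
  induction l with
  | nil => cases hn
  | cons a t ih =>
    rcases List.nodup_cons.mp hl with ⟨hat, hts⟩
    rw [List.countP_cons, List.countP_cons]
    by_cases hna : n = a
    · subst hna
      have hteq : t.countP p = t.countP q :=
        List.countP_congr (fun u hu => by
          rw [hagree u (List.mem_cons_of_mem _ hu) (fun e => hat (e ▸ hu))])
      rw [hteq, hpn]
      by_cases hq : q n = true <;> simp [hq] <;> push_cast <;> omega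
    · have hnt : n ∈ t := (List.mem_cons.mp hn).resolve_left hna
      have hpa : p a = q a := hagree a List.mem_cons_self (fun e => hna e.symm)
      have hih := ih hts hnt (fun u hu hun => hagree u (List.mem_cons_of_mem _ hu) hun)
      rw [hpa]
      by_cases hq : q a = true <;> simp [hq] <;> push_cast <;> push_cast at hih <;> omega

lemma pvRem_discard (node_ids : List Int) (adjacency : List (Int × List (Int × Int)))
    {S : List Int} {n : Int} (hnS : n ∈ S) (hSN : ∀ x ∈ S, x ∈ pvN node_ids) (m : Int) :
    pvRem node_ids adjacency (PySem.Set.discard S n) m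
      = pvRem node_ids adjacency S m + (if m ∈ pvAdjKeys adjacency n then 1 else 0) := by
  have hnN : n ∈ pvN node_ids := hSN n hnS
  have key := pv_countP_remove (l := pvN node_ids)
    (by unfold pvN; exact PySem.Set.nodup_ofList _) hnN
    (p := fun u => !PySem.Set.contains S u && PySem.Set.contains (pvAdjKeys adjacency u) m)
    (q := fun u => !PySem.Set.contains (PySem.Set.discard S n) u && PySem.Set.contains (pvAdjKeys adjacency u) m)
    (fun u _ hun => by
      by_cases huS : u ∈ S <;>
        simp [PySem.Set.mem_discard, huS, hun])
    (by simp [hnS])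
  unfold pvRem
  rw [key]
  congr 1
  have hnd : n ∉ PySem.Set.discard S n := by simp [PySem.Set.mem_discard]
  by_cases hm : m ∈ pvAdjKeys adjacency n <;>
    simp [hnd, hm]

lemma pvRem_diff (node_ids : List Int) (adjacency : List (Int × List (Int × Int))) :
    ∀ (ds : List Int) (S : List Int), ds.Nodup → (∀ u ∈ ds, u ∈ S) → (∀ x ∈ S, x ∈ pvN node_ids) →
    ∀ m, pvRem node_ids adjacency (PySem.Set.diff S ds) m
      = pvRem node_ids adjacency S m + (ds.countP (fun u => PySem.Set.contains (pvAdjKeys adjacency u) m) : Int) := by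
  intro ds
  induction ds with
  | nil =>
    intro S _ _ _ m
    rw [pvRem_congr node_ids adjacency (T := S) (fun u => by simp [PySem.Set.mem_diff])]
    simp
  | cons h t ih =>
    intro S hnd hsub hSN m
    rcases List.nodup_cons.mp hnd with ⟨hht, hts⟩
    have hhS : h ∈ S := hsub h List.mem_cons_self
    have step1 : pvRem node_ids adjacency (PySem.Set.diff S (h :: t)) m
        = pvRem node_ids adjacency (PySem.Set.diff (PySem.Set.discard S h) t) m := by
      apply pvRem_congr
      intro u
      simp only [PySem.Set.mem_diff, PySem.Set.mem_discard, List.mem_cons]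
      constructor
      · rintro ⟨hu1, hu2⟩
        exact ⟨⟨hu1, fun e => hu2 (Or.inl e)⟩, fun e => hu2 (Or.inr e)⟩
      · rintro ⟨⟨hu1, hu2⟩, hu3⟩
        exact ⟨hu1, fun e => e.elim hu2 hu3⟩
    have hsub' : ∀ u ∈ t, u ∈ PySem.Set.discard S h := fun u hu =>
      (PySem.Set.mem_discard S h u).mpr
        ⟨hsub u (List.mem_cons_of_mem _ hu), fun e => hht (e ▸ hu)⟩
    have hSN' : ∀ x ∈ PySem.Set.discard S h, x ∈ pvN node_ids := fun x hx =>
      hSN x ((PySem.Set.mem_discard S h x).mp hx).1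
    have step2 := ih (PySem.Set.discard S h) hts hsub' hSN' m
    rw [step1, step2, pvRem_discard node_ids adjacency hhS hSN m, List.countP_cons]
    by_cases hm : m ∈ pvAdjKeys adjacency h <;>
      simp [hm] <;> push_cast <;> omega

lemma pvRem_full (node_ids : List Int) (adjacency : List (Int × List (Int × Int))) (m : Int) :
    pvRem node_ids adjacency (pvN node_ids) m = 0 := by
  have hz : (pvN node_ids).countP
      (fun u => !PySem.Set.contains (pvN node_ids) u && PySem.Set.contains (pvAdjKeys adjacency u) m) = 0 :=
    List.countP_eq_zero.mpr (fun u hu => by simp [hu])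
  unfold pvRem
  rw [hz]
  simp

lemma pvEff_mono (node_ids : List Int) (adjacency : List (Int × List (Int × Int)))
    {T S : List Int} (hTS : ∀ x ∈ T, x ∈ S) (m : Int) :
    pvEff node_ids adjacency T m ≤ pvEff node_ids adjacency S m := by
  unfold pvEff
  have h : pvRem node_ids adjacency S m ≤ pvRem node_ids adjacency T m := by
    unfold pvRem
    have := List.countP_mono_left (l := pvN node_ids)
      (p := fun u => !PySem.Set.contains S u && PySem.Set.contains (pvAdjKeys adjacency u) m)
      (q := fun u => !PySem.Set.contains T u && PySem.Set.contains (pvAdjKeys adjacency u) m)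
      (fun u _ hu => by
        simp only [pv_contains_eq_decide, Bool.and_eq_true, Bool.not_eq_true',
          decide_eq_false_iff_not, decide_eq_true_eq] at hu ⊢
        exact ⟨fun ht => hu.1 (hTS u ht), hu.2⟩)
    exact_mod_cast this
  omega

lemma pv_getD_foldl_insert (f : Int → Int) (l : List Int) :
    ∀ (d : PySem.Dict Int Int) (m : Int),
    (l.foldl (fun d n => d.insert n (f n)) d).getD m 0 = if m ∈ l then f m else d.getD m 0 := by
  intro d m
  induction l generalizing d with
  | nil => simp
  | cons a t ih =>
    simp only [List.foldl_cons]
    rw [ih]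
    by_cases hmt : m ∈ t
    · simp [List.mem_cons, hmt]
    · rw [PySem.Dict.getD_insert]
      by_cases hma : m = a <;> simp [List.mem_cons, hmt, hma]

-- one removal step of A: decrement every still-remaining neighbour, queue the newly deficient
lemma pvAStep (S' : List Int) (k : Int) : ∀ (l : List Int), l.Nodup →
    ∀ (d : PySem.Dict Int Int) (q : List Int),
    (∀ m : Int,
      (l.foldl (fun st v =>
          if PySem.Set.contains S' v then
            let d2 := st.1.modify v 0 (· - 1)
            if d2.getD v 0 < k then (d2, st.2 ++ [v]) else (d2, st.2)
          else st) (d, q)).1.getD m 0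
        = d.getD m 0 - (if m ∈ l ∧ m ∈ S' then 1 else 0)) ∧
    (∀ m : Int,
      m ∈ (l.foldl (fun st v =>
          if PySem.Set.contains S' v then
            let d2 := st.1.modify v 0 (· - 1)
            if d2.getD v 0 < k then (d2, st.2 ++ [v]) else (d2, st.2)
          else st) (d, q)).2
        ↔ m ∈ q ∨ (m ∈ l ∧ m ∈ S' ∧
            (l.foldl (fun st v =>
              if PySem.Set.contains S' v then
                let d2 := st.1.modify v 0 (· - 1)
                if d2.getD v 0 < k then (d2, st.2 ++ [v]) else (d2, st.2)
              else st) (d, q)).1.getD m 0 < k)) := by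
  intro l
  induction l with
  | nil => intro _ d q; exact ⟨fun m => by simp, fun m => by simp⟩
  | cons v t ih =>
    intro hl d q
    rcases List.nodup_cons.mp hl with ⟨hv, ht⟩
    simp only [List.foldl_cons]
    by_cases hc : PySem.Set.contains S' v = true
    · have hvS : v ∈ S' := (PySem.Set.contains_iff S' v).mp hc
      rw [if_pos hc]
      by_cases hlt : (d.modify v 0 (· - 1)).getD v 0 < k
      · rw [if_pos hlt]
        obtain ⟨ih1, ih2⟩ := ih ht (d.modify v 0 (· - 1)) (q ++ [v])
        refine ⟨fun m => ?_, fun m => ?_⟩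
        · rw [ih1 m, PySem.Dict.getD_modify]
          by_cases hmv : m = v
          · subst hmv; simp [hv, hvS, List.mem_cons]
          · by_cases hmt : m ∈ t <;> by_cases hmS : m ∈ S' <;>
              simp [hmv, hmt, hmS, List.mem_cons]
        · rw [ih2 m]
          by_cases hmv : m = v
          · subst hmv
            rw [ih1 m]
            have hlt' := hlt
            rw [PySem.Dict.getD_modify] at hlt'
            simp only [if_pos rfl] at hlt'
            simp [hv, hvS, List.mem_append]
            omega
          · simp [hmv, List.mem_append, List.mem_cons]
      · rw [if_neg hlt]
        obtain ⟨ih1, ih2⟩ := ih ht (d.modify v 0 (· - 1)) q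
        refine ⟨fun m => ?_, fun m => ?_⟩
        · rw [ih1 m, PySem.Dict.getD_modify]
          by_cases hmv : m = v
          · subst hmv; simp [hv, hvS, List.mem_cons]
          · by_cases hmt : m ∈ t <;> by_cases hmS : m ∈ S' <;>
              simp [hmv, hmt, hmS, List.mem_cons]
        · rw [ih2 m]
          by_cases hmv : m = v
          · subst hmv
            rw [ih1 m]
            simp [hv, hvS]
            intro h
            exfalso
            rw [PySem.Dict.getD_modify] at hlt
            simp at hlt
            omega
          · simp [hmv, List.mem_cons]
    · have hvS : v ∉ S' := fun h => hc ((PySem.Set.contains_iff S' v).mpr h)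
      rw [if_neg hc]
      obtain ⟨ih1, ih2⟩ := ih ht d q
      refine ⟨fun m => ?_, fun m => ?_⟩
      · rw [ih1 m]
        by_cases hmv : m = v
        · subst hmv; simp [hvS, hv]
        · by_cases hmt : m ∈ t <;> by_cases hmS : m ∈ S' <;>
            simp [hmv, hmt, hmS, List.mem_cons]
      · rw [ih2 m]
        by_cases hmv : m = v
        · subst hmv; simp [hvS, hv]
        · simp [hmv, List.mem_cons]

lemma pvBStep1 (S' : List Int) : ∀ (l : List Int), l.Nodup →
    ∀ (d : PySem.Dict Int Int) (m : Int),
    (l.foldl (fun d v => if PySem.Set.contains S' v then d.modify v 0 (· - 1) else d) d).getD m 0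
      = d.getD m 0 - (if m ∈ l ∧ m ∈ S' then 1 else 0) := by
  intro l
  induction l with
  | nil => intro _ d m; simp
  | cons v t ih =>
    intro hl d m
    rcases List.nodup_cons.mp hl with ⟨hv, ht⟩
    simp only [List.foldl_cons]
    by_cases hc : PySem.Set.contains S' v = true
    · have hvS : v ∈ S' := (PySem.Set.contains_iff S' v).mp hc
      rw [if_pos hc, ih ht _ m, PySem.Dict.getD_modify]
      by_cases hmv : m = v
      · subst hmv
        simp [hv, hvS, List.mem_cons]
      · by_cases hmt : m ∈ t <;> by_cases hmS : m ∈ S' <;>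
          simp [hmv, hmt, hmS, List.mem_cons]
    · have hvS : v ∉ S' := fun h => hc ((PySem.Set.contains_iff S' v).mpr h)
      rw [if_neg hc, ih ht d m]
      by_cases hmv : m = v
      · subst hmv; simp [hvS, hv]
      · by_cases hmt : m ∈ t <;> by_cases hmS : m ∈ S' <;>
          simp [hmv, hmt, hmS, List.mem_cons]

lemma pvBStep (adjacency : List (Int × List (Int × Int))) (S' : List Int) :
    ∀ (ds : List Int) (d : PySem.Dict Int Int) (m : Int), m ∈ S' →
    (ds.foldl (fun d u => (pvAdjKeys adjacency u).foldl
        (fun d v => if PySem.Set.contains S' v then d.modify v 0 (· - 1) else d) d) d).getD m 0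
      = d.getD m 0 - (ds.countP (fun u => PySem.Set.contains (pvAdjKeys adjacency u) m) : Int) := by
  intro ds
  induction ds with
  | nil => intro d m _; simp
  | cons u t ih =>
    intro d m hm
    simp only [List.foldl_cons, List.countP_cons]
    rw [ih _ m hm,
      pvBStep1 S' (pvAdjKeys adjacency u) (pvAdjKeys_nodup adjacency u) d m]
    by_cases hmu : m ∈ pvAdjKeys adjacency u <;>
      simp [hmu, hm] <;> omega

lemma pvALoop_spec (node_ids : List Int) (adjacency : List (Int × List (Int × Int))) (k : Int) :
    ∀ (q : List Int) (S : PySem.Set Int) (d : PySem.Dict Int Int),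
    S.Nodup → (∀ x ∈ S, x ∈ pvN node_ids) →
    (∀ m ∈ S, d.getD m 0 = pvEff node_ids adjacency S m) →
    (∀ m ∈ S, pvEff node_ids adjacency S m < k → m ∈ q) →
    (∀ m ∈ q, m ∈ S → d.getD m 0 < k) →
    (pvALoop adjacency k q S d).Nodup ∧
    pvGood node_ids adjacency k (pvALoop adjacency k q S d) ∧
    (∀ T : List Int, pvGood node_ids adjacency k T → (∀ x ∈ T, x ∈ S) →
      ∀ x ∈ T, x ∈ pvALoop adjacency k q S d) := by
  intro q S d
  induction q, S, d using pvALoop.induct (adjacency := adjacency) (k := k) with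
  | case1 S d =>
    intro hnd hSN hdeg hlow _
    rw [pvALoop]
    refine ⟨hnd, ⟨hSN, fun m hm => ?_⟩, fun T _ hTS => hTS⟩
    by_contra hlt
    exact absurd (hlow m hm (by omega)) List.not_mem_nil
  | case2 n q S d hn S2 st2 ih =>
    intro hnd hSN hdeg hlow hqlow
    rw [pvALoop, dif_pos hn]
    obtain ⟨f1, f2⟩ := pvAStep (PySem.Set.discard S n) k (pvAdjKeys adjacency n)
      (pvAdjKeys_nodup adjacency n) d q
    have hst1 : ∀ m : Int, st2.1.getD m 0
        = d.getD m 0 - (if m ∈ pvAdjKeys adjacency n ∧ m ∈ PySem.Set.discard S n then 1 else 0) := f1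
    have hst2 : ∀ m : Int, m ∈ st2.2 ↔ m ∈ q ∨
        (m ∈ pvAdjKeys adjacency n ∧ m ∈ PySem.Set.discard S n ∧ st2.1.getD m 0 < k) := f2
    have hnk : d.getD n 0 < k := hqlow n List.mem_cons_self hn
    have heffn : pvEff node_ids adjacency S n < k := by rw [← hdeg n hn]; exact hnk
    have hrem := fun m => pvRem_discard node_ids adjacency hn hSN m
    have hS2 : ∀ m : Int, m ∈ S2 ↔ m ∈ S ∧ m ≠ n := fun m => PySem.Set.mem_discard S n m
    have heq' : ∀ m ∈ S2, pvEff node_ids adjacency S2 m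
        = pvEff node_ids adjacency S m - (if m ∈ pvAdjKeys adjacency n then 1 else 0) := by
      intro m _
      show pvEff node_ids adjacency (PySem.Set.discard S n) m = _
      unfold pvEff
      rw [hrem m]
      by_cases hma : m ∈ pvAdjKeys adjacency n <;> simp [hma] <;> ring
    have hdeg' : ∀ m ∈ S2, st2.1.getD m 0 = pvEff node_ids adjacency S2 m := by
      intro m hm
      obtain ⟨hmS, hmn⟩ := (hS2 m).mp hm
      rw [hst1 m, hdeg m hmS, heq' m hm]
      have hm' : m ∈ PySem.Set.discard S n := hm
      by_cases hma : m ∈ pvAdjKeys adjacency n <;> simp [hma, hm']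
    have hTsub : ∀ T : List Int, pvGood node_ids adjacency k T → (∀ x ∈ T, x ∈ S) →
        ∀ x ∈ T, x ∈ S2 := by
      intro T hT hTS x hxT
      rw [hS2 x]
      refine ⟨hTS x hxT, fun e => ?_⟩
      subst e
      have h1 := hT.2 x hxT
      have h2 := pvEff_mono node_ids adjacency hTS x
      linarith
    have res := ih
      (PySem.Set.nodup_discard S n hnd)
      (fun x hx => hSN x ((hS2 x).mp hx).1)
      hdeg'
      (fun m hm hlt => (hst2 m).mpr (by
        obtain ⟨hmS, hmn⟩ := (hS2 m).mp hm
        have hm' : m ∈ PySem.Set.discard S n := hm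
        by_cases hma : m ∈ pvAdjKeys adjacency n
        · exact Or.inr ⟨hma, hm', by rw [hdeg' m hm]; exact hlt⟩
        · refine Or.inl ?_
          have heq2 : pvEff node_ids adjacency S2 m = pvEff node_ids adjacency S m := by
            rw [heq' m hm]; simp [hma]
          have hmem := hlow m hmS (heq2 ▸ hlt)
          exact (List.mem_cons.mp hmem).resolve_left (fun e => hmn e)))
      (fun m hm hmS2 => by
        rcases (hst2 m).mp hm with hq | ⟨_, _, hlt⟩
        · have hdm : d.getD m 0 < k :=
            hqlow m (List.mem_cons_of_mem _ hq) ((hS2 m).mp hmS2).1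
          rw [hst1 m]
          have hm' : m ∈ PySem.Set.discard S n := hmS2
          by_cases hma : m ∈ pvAdjKeys adjacency n <;> simp [hma, hm'] <;> omega
        · exact hlt)
    exact ⟨res.1, res.2.1, fun T hT hTS => res.2.2 T hT (hTsub T hT hTS)⟩
  | case3 n q S d hn ih =>
    intro hnd hSN hdeg hlow hqlow
    rw [pvALoop, dif_neg hn]
    apply ih hnd hSN hdeg
    · intro m hm hlt
      rcases List.mem_cons.mp (hlow m hm hlt) with rfl | h
      · exact absurd hm hn
      · exact h
    · exact fun m hm hmS => hqlow m (List.mem_cons_of_mem _ hm) hmS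

lemma pvBLoop_spec (node_ids : List Int) (adjacency : List (Int × List (Int × Int))) (k : Int) :
    ∀ (S : PySem.Set Int) (d : PySem.Dict Int Int),
    S.Nodup → (∀ x ∈ S, x ∈ pvN node_ids) →
    (∀ m ∈ S, d.getD m 0 = pvEff node_ids adjacency S m) →
    (pvBLoop adjacency k S d).Nodup ∧
    pvGood node_ids adjacency k (pvBLoop adjacency k S d) ∧
    (∀ T : List Int, pvGood node_ids adjacency k T → (∀ x ∈ T, x ∈ S) →
      ∀ x ∈ T, x ∈ pvBLoop adjacency k S d) := by
  intro S d
  induction S, d using pvBLoop.induct (adjacency := adjacency) (k := k) with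
  | case1 S d dm1 hempty =>
    intro hnd hSN hdeg
    rw [pvBLoop, if_pos hempty]
    refine ⟨hnd, ⟨hSN, fun m hm => ?_⟩, fun T _ hTS => hTS⟩
    have hnil : pvDoomed k S d = [] := List.isEmpty_iff.mp hempty
    have hkm := List.filter_eq_nil_iff.mp hnil m hm
    rw [← hdeg m hm]
    simpa using hkm
  | case2 S d dm2 hne S2 d2 ih =>
    intro hnd hSN hdeg
    rw [pvBLoop, if_neg hne]
    have hdoomS : ∀ u ∈ pvDoomed k S d, u ∈ S := fun u hu => (List.mem_filter.mp hu).1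
    have hdoomlt : ∀ u ∈ pvDoomed k S d, d.getD u 0 < k := fun u hu => by
      simpa using (List.mem_filter.mp hu).2
    have hnodupD : (pvDoomed k S d).Nodup := hnd.filter _
    have hS2 : ∀ m : Int, m ∈ S2 ↔ m ∈ S ∧ m ∉ pvDoomed k S d := fun m =>
      PySem.Set.mem_diff S (pvDoomed k S d) m
    have hTsub : ∀ T : List Int, pvGood node_ids adjacency k T → (∀ x ∈ T, x ∈ S) →
        ∀ x ∈ T, x ∈ S2 := by
      intro T hT hTS x hxT
      rw [hS2 x]
      refine ⟨hTS x hxT, fun hxD => ?_⟩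
      have h1 := hT.2 x hxT
      have h2 := pvEff_mono node_ids adjacency hTS x
      have h3 := hdoomlt x hxD
      rw [hdeg x (hTS x hxT)] at h3
      linarith
    have hrem := pvRem_diff node_ids adjacency (pvDoomed k S d) S hnodupD hdoomS hSN
    have hd2 : ∀ m : Int, m ∈ PySem.Set.diff S (pvDoomed k S d) → d2.getD m 0
        = d.getD m 0 - ((pvDoomed k S d).countP
            (fun u => PySem.Set.contains (pvAdjKeys adjacency u) m) : Int) :=
      fun m hm => pvBStep adjacency (PySem.Set.diff S (pvDoomed k S d)) (pvDoomed k S d) d m hm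
    have res := ih
      (PySem.Set.nodup_diff S _ hnd)
      (fun x hx => hSN x ((hS2 x).mp hx).1)
      (fun m hm => by
        have hmS : m ∈ S := ((hS2 m).mp hm).1
        have hm' : m ∈ PySem.Set.diff S (pvDoomed k S d) := hm
        rw [hd2 m hm', hdeg m hmS]
        show _ = pvEff node_ids adjacency (PySem.Set.diff S (pvDoomed k S d)) m
        unfold pvEff
        rw [hrem m]
        ring)
    exact ⟨res.1, res.2.1, fun T hT hTS => res.2.2 T hT (hTsub T hT hTS)⟩

-- ===== VERDICT (by name: the statement is the Claim_ definition above) =====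
theorem compute_k_core_nodes_spec : Claim_equal_compute_k_core_nodes := by
  intro node_ids adjacency k_core _ _
  unfold Spec_compute_k_core_nodes
  simp only [compute_k_core_nodes, compute_k_core_nodes_alt]
  have hdA : ∀ m : Int, (node_ids.foldl
      (fun d n => d.insert n ((pvAdjKeys adjacency n).foldl
        (fun acc v => if PySem.Set.contains (PySem.Set.ofList node_ids) v then acc + 1 else acc) (0 : Int)))
      PySem.Dict.empty).getD m 0
      = if m ∈ node_ids then pvDeg0 node_ids adjacency m else 0 := by
    intro m
    rw [pv_getD_foldl_insert]
    by_cases hm : m ∈ node_ids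
    · simp only [hm, if_true]
      rw [PySem.List.foldl_if_add_one, zero_add]
      rfl
    · simp [hm]
  have hdB : ∀ m : Int, (node_ids.foldl
      (fun d n => d.insert n (((pvAdjKeys adjacency n).countP
        (fun v => PySem.Set.contains (PySem.Set.ofList node_ids) v) : Nat) : Int))
      PySem.Dict.empty).getD m 0
      = if m ∈ node_ids then pvDeg0 node_ids adjacency m else 0 := by
    intro m
    rw [pv_getD_foldl_insert]
    by_cases hm : m ∈ node_ids
    · simp only [hm, if_true]
      rfl
    · simp [hm]
  have hNnd : (PySem.Set.ofList node_ids).Nodup := PySem.Set.nodup_ofList _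
  have hNN : ∀ x ∈ PySem.Set.ofList node_ids, x ∈ pvN node_ids := fun x hx => hx
  have heff0 : ∀ m : Int, pvEff node_ids adjacency (PySem.Set.ofList node_ids) m
      = pvDeg0 node_ids adjacency m := by
    intro m
    show pvEff node_ids adjacency (pvN node_ids) m = _
    unfold pvEff
    rw [pvRem_full]
    ring
  obtain ⟨hAnd, hAgood, hAmax⟩ := pvALoop_spec node_ids adjacency k_core
    (node_ids.filter (fun n => decide ((node_ids.foldl
      (fun d n => d.insert n ((pvAdjKeys adjacency n).foldl
        (fun acc v => if PySem.Set.contains (PySem.Set.ofList node_ids) v then acc + 1 else acc) (0 : Int)))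
      PySem.Dict.empty).getD n 0 < k_core)))
    (PySem.Set.ofList node_ids)
    (node_ids.foldl
      (fun d n => d.insert n ((pvAdjKeys adjacency n).foldl
        (fun acc v => if PySem.Set.contains (PySem.Set.ofList node_ids) v then acc + 1 else acc) (0 : Int)))
      PySem.Dict.empty)
    hNnd hNN
    (fun m hm => by rw [hdA m, heff0 m]; simp [(PySem.Set.mem_ofList node_ids m).mp hm])
    (fun m hm hlt => by
      rw [List.mem_filter]
      refine ⟨(PySem.Set.mem_ofList node_ids m).mp hm, ?_⟩
      rw [hdA m]
      simp [(PySem.Set.mem_ofList node_ids m).mp hm]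
      rw [← heff0 m]
      exact hlt)
    (fun m hm _ => by
      have := (List.mem_filter.mp hm).2
      simpa using this)
  obtain ⟨hBnd, hBgood, hBmax⟩ := pvBLoop_spec node_ids adjacency k_core
    (PySem.Set.ofList node_ids)
    (node_ids.foldl
      (fun d n => d.insert n (((pvAdjKeys adjacency n).countP
        (fun v => PySem.Set.contains (PySem.Set.ofList node_ids) v) : Nat) : Int))
      PySem.Dict.empty)
    hNnd hNN
    (fun m hm => by rw [hdB m, heff0 m]; simp [(PySem.Set.mem_ofList node_ids m).mp hm])
  have hmem := fun x => Iff.intro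
    (fun h => hBmax _ hAgood hAgood.1 x h)
    (fun h => hAmax _ hBgood hBgood.1 x h)
  exact (PySem.List.sorted_id_eq_sorted_id_iff_perm _ _).mpr
    ((List.perm_ext_iff_of_nodup hAnd hBnd).mpr hmem)
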